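-- pv_equiv track=rewrite | github.com/luismaia-git/Estrutura-de-dados | Listas (arrays)/resoluções/1e.py | itemE
-- ===== SOURCE A (Python) =====
-- def itemE(arr):
--
--     aux = len(arr)//2
--
--     for i in range(0, aux):
--         if i % 2 == 0:
--             for j in range(aux, len(arr)):
--                 if j % 2 == 1:
--                     aux2   = arr[i]
--                     arr[i] = arr[j]
--                     arr[j] = aux2
--                     aux = j+1
--                     return arr
-- ===== SOURCE B (Python) =====
-- def itemE(arr):
--     if len(arr) < 2:
--         return None
--     m = len(arr) // 2
--     j = m if m % 2 == 1 else m + 1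
--     arr[0], arr[j] = arr[j], arr[0]
--     return arr
-- ===== Notes on version B (the rewrite author's own statement) =====
-- stated objective: simpler
-- what changed: Replaces A's nested scan loops with a closed-form computation of the first odd index at or past the midpoint, followed by one tuple swap.
import Mathlib
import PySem

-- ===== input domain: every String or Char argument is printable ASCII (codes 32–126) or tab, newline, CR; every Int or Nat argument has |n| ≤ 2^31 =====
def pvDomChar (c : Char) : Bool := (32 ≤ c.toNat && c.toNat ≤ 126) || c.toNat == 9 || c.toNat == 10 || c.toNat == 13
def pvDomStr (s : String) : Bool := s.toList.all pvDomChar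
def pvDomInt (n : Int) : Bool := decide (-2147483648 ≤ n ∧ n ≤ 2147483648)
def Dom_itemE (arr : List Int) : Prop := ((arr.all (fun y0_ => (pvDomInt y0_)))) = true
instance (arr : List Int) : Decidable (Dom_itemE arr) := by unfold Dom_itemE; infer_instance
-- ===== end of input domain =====

-- B replaces A's nested search loops by a closed-form first-odd-index-past-midpoint and one swap (simpler);
-- both Pythons mutate arr in place identically, the equivalence proved is about the return value.


-- ===== PORT A =====
-- inner 'for j in range(aux, len(arr))' loop; the indices i and j produced by the ranges are
-- always nonnegative and in range, so the total forms pyGetD/pySetD are exact here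
def itemEInner (arr : List Int) (i : Int) : List Int → Option (List Int)
  | [] => none
  | j :: js =>
    if PySem.Int.mod j 2 == 1 then
      let aux2 := PySem.List.pyGetD arr i 0
      let arr1 := PySem.List.pySetD arr i (PySem.List.pyGetD arr j 0)
      let arr2 := PySem.List.pySetD arr1 j aux2
      some arr2
    else itemEInner arr i js

-- outer 'for i in range(0, aux)' loop; falling off the end returns None
def itemEOuter (arr : List Int) (aux : Int) : List Int → Option (List Int)
  | [] => none
  | i :: is =>
    if PySem.Int.mod i 2 == 0 then
      match itemEInner arr i (PySem.List.pyRange aux (arr.length : Int) 1) with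
      | some r => some r
      | none => itemEOuter arr aux is
    else itemEOuter arr aux is

def itemE (arr : List Int) : Option (List Int) :=
  let aux := PySem.Int.floordiv (arr.length : Int) 2
  itemEOuter arr aux (PySem.List.pyRange 0 aux 1)

-- ===== PORT B =====
def itemE_alt (arr : List Int) : Option (List Int) :=
  if arr.length < 2 then none
  else
    let m := PySem.Int.floordiv (arr.length : Int) 2
    let j := if PySem.Int.mod m 2 == 1 then m else m + 1
    some (PySem.List.pySetD (PySem.List.pySetD arr 0 (PySem.List.pyGetD arr j 0)) j
            (PySem.List.pyGetD arr 0 0))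

-- ===== PRECONDITION & SPEC =====
def Spec_itemE (arr : List Int) (out : Option (List Int)) : Prop := out = itemE_alt arr
instance (arr : List Int) (out : Option (List Int)) : Decidable (Spec_itemE arr out) := by unfold Spec_itemE; infer_instance

-- ===== CLAIM (what is proved, stated in full; the proofs are below) =====
def Claim_equal_itemE : Prop := ∀ (arr : List Int), Dom_itemE arr → Spec_itemE arr (itemE arr)

-- ===== LEMMAS AND PROOFS =====

theorem itemE_small (arr : List Int) (h : arr.length < 2) : itemE arr = none := by
  have ha : PySem.Int.floordiv (arr.length : Int) 2 = ((arr.length / 2 : Nat) : Int) :=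
    PySem.Int.floordiv_natCast arr.length 2
  have hz : (arr.length / 2 : Nat) = 0 := by omega
  simp only [itemE, ha, hz]
  rw [PySem.List.pyRange_one_eq_nil (by norm_num)]
  rfl

theorem mod_two_cast (a : Nat) : PySem.Int.mod (a : Int) 2 = ((a % 2 : Nat) : Int) :=
  PySem.Int.mod_natCast a 2

-- ===== VERDICT (by name: the statement is the Claim_ definition above) =====
theorem itemE_spec : Claim_equal_itemE := by
  intro arr _
  unfold Spec_itemE
  by_cases h2 : arr.length < 2
  · rw [itemE_small arr h2, itemE_alt, if_pos h2]
  · have hn : 2 ≤ arr.length := by omega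
    have ha : PySem.Int.floordiv (arr.length : Int) 2 = ((arr.length / 2 : Nat) : Int) :=
      PySem.Int.floordiv_natCast arr.length 2
    set a : Nat := arr.length / 2 with hadef
    have ha1 : 1 ≤ a := by omega
    have haltn : a < arr.length := by omega
    -- unfold A: the outer range starts with i = 0, which is even
    rw [itemE, ha]
    rw [PySem.List.pyRange_one_cons (by exact_mod_cast ha1)]
    rw [itemEOuter]
    rw [if_pos (by norm_num [PySem.Int.mod])]
    -- the inner range starts at a
    rw [PySem.List.pyRange_one_cons (by exact_mod_cast haltn)]
    rw [itemEInner]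
    rw [itemE_alt, if_neg h2, ha]
    by_cases hodd : a % 2 = 1
    · have hm : PySem.Int.mod (a : Int) 2 = 1 := by rw [mod_two_cast, hodd]; rfl
      rw [hm]
      have hca : ((a : Int)) % 2 = 1 := by omega
      norm_num [hca, PySem.List.pySetD_of_nonneg]
    · have heven : a % 2 = 0 := by omega
      have hm0 : PySem.Int.mod (a : Int) 2 = 0 := by rw [mod_two_cast, heven]; rfl
      have hm1 : PySem.Int.mod ((a : Int) + 1) 2 = 1 := by
        have h := mod_two_cast (a + 1)
        push_cast at h
        rw [h]; omega
      rw [hm0, if_neg (by decide)]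
      rw [PySem.List.pyRange_one_cons (by omega)]
      rw [itemEInner, hm1]
      have hca : ¬ ((a : Int)) % 2 = 1 := by omega
      norm_num [hca]
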